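-- pv_equiv track=rewrite | github.com/gabrielnkuna/aurora-vtol | src/aurora_vtol/fault_workflows.py | _fault_case_slug
-- ===== SOURCE A (Python) =====
-- def _fault_case_slug(label: str) -> str:
--
--     chars = []
--
--     for char in label.lower():
--
--         if char.isalnum():
--
--             chars.append(char)
--
--         else:
--
--             chars.append('-')
--
--     slug = ''.join(chars)
--
--     while '--' in slug:
--
--         slug = slug.replace('--', '-')
--
--     return slug.strip('-') or 'fault-case'
-- ===== SOURCE B (Python) =====
-- def _fault_case_slug(label: str) -> str:
--     tokens = []
--     buf = []
--     for char in label.lower():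
--         if char.isalnum():
--             buf.append(char)
--         else:
--             if buf:
--                 tokens.append(''.join(buf))
--                 buf = []
--     if buf:
--         tokens.append(''.join(buf))
--     return '-'.join(tokens) or 'fault-case'
-- ===== Notes on version B (the rewrite author's own statement) =====
-- stated objective: simpler
-- what changed: Single-pass tokenizer: accumulate each run of alphanumeric characters into a buffer and join the collected tokens with dashes, instead of A's pipeline of marking every character, repeatedly replacing double dashes until a fixpoint, and stripping edge dashes.
import Mathlib
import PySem

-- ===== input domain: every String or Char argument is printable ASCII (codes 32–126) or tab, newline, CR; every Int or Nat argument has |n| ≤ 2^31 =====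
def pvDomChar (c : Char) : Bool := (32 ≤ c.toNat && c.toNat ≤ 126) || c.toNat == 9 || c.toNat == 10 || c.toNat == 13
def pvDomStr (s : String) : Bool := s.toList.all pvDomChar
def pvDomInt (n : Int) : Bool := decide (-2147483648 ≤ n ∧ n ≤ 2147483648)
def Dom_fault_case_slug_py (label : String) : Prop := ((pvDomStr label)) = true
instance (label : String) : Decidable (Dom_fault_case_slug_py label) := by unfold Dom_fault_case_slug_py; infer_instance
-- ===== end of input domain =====

-- B replaces A's mark-every-char / repeated '--'→'-' replacement / strip('-') pipeline by a
-- single-pass tokenizer that joins the alphanumeric runs with '-'; objective: simpler.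

-- ===== PORT A =====
-- spec recursion for s.replace('--','-'); used only to justify termination of the while loop
def dashRep : List Char → List Char
  | [] => []
  | [c] => [c]
  | c :: d :: t => if c = '-' ∧ d = '-' then '-' :: dashRep t else c :: dashRep (d :: t)

theorem replace_go_eq (fuel : Nat) : ∀ (l acc : List Char), l.length ≤ fuel →
    PySem.Chars.replace.go ['-', '-'] ['-'] fuel l acc = acc.reverse ++ dashRep l := by
  induction fuel with
  | zero => intro l acc h
            have : l = [] := List.length_eq_zero_iff.mp (Nat.le_zero.mp h)
            subst this; simp [PySem.Chars.replace.go, dashRep]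
  | succ n ih =>
    intro l acc h
    match l with
    | [] => simp [PySem.Chars.replace.go, dashRep]
    | c :: t =>
      rw [PySem.Chars.replace.go]
      by_cases hp : List.isPrefixOf ['-', '-'] (c :: t)
      · obtain ⟨t', ht⟩ : ∃ t', c :: t = '-' :: '-' :: t' := by
          rw [List.isPrefixOf_iff_prefix] at hp
          obtain ⟨t', ht⟩ := hp
          exact ⟨t', by simpa using ht.symm⟩
        obtain ⟨rfl, rfl⟩ : c = '-' ∧ t = '-' :: t' := by simpa using ht
        simp only [hp, if_pos]
        rw [ih _ _ (by simp at h ⊢; omega)]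
        simp [dashRep]
      · simp only [hp]
        rw [if_neg (by simp), ih _ _ (by simpa using Nat.le_of_succ_le_succ h)]
        have hd : dashRep (c :: t) = c :: dashRep t := by
          match t with
          | [] => simp [dashRep]
          | d :: t2 =>
            rw [dashRep]
            rw [if_neg]
            intro ⟨h1, h2⟩
            exact hp (by simp [h1, h2])
        rw [hd]; simp

theorem replace_dash_eq (s : List Char) :
    PySem.Chars.replace s ['-', '-'] ['-'] = dashRep s := by
  rw [PySem.Chars.replace]
  rw [if_neg (by simp)]
  rw [replace_go_eq s.length s [] le_rfl]
  simp

theorem length_dashRep_le (s : List Char) : (dashRep s).length ≤ s.length := by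
  fun_induction dashRep with
  | case1 => simp
  | case2 => simp
  | case3 c d t hcd ih => simp [hcd] at *; omega
  | case4 c d t hcd ih => simp [hcd] at *; omega

theorem length_dashRep_lt (s : List Char) (h : ['-', '-'] <:+: s) :
    (dashRep s).length < s.length := by
  fun_induction dashRep with
  | case1 => simp at h
  | case2 c => exfalso; rcases h with ⟨a, b, hab⟩
               have := congrArg List.length hab; simp at this; omega
  | case3 c d t hcd ih =>
    have := length_dashRep_le t
    simp [hcd]; omega
  | case4 c d t hcd ih =>
    have hinf : ['-', '-'] <:+: d :: t := by
      rcases (List.infix_cons_iff).mp h with hpre | hinf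
      · exfalso; apply hcd
        rcases hpre with ⟨r, hr⟩
        constructor <;> [skip; skip] <;> simp at hr <;> tauto
      · exact hinf
    have := ih hinf
    simp at this ⊢; omega
-- while '--' in slug: slug = slug.replace('--', '-')
def repLoopA (s : List Char) : List Char :=
  if h : PySem.Chars.isIn ['-', '-'] s = true then
    repLoopA (PySem.Chars.replace s ['-', '-'] ['-'])
  else s
termination_by s.length
decreasing_by
  rw [replace_dash_eq]
  exact length_dashRep_lt s ((PySem.Chars.isIn_iff_infix _ _).mp h)
def fault_case_slug_py (label : String) : String :=
  -- chars = []; for char in label.lower(): append char if char.isalnum() else '-'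
  let chars : List Char := (PySem.Chars.lower label.toList).foldl
    (fun acc c => if PySem.Chars.isalnum c then acc ++ [c] else acc ++ ['-']) []
  -- slug = ''.join(chars); while '--' in slug: slug = slug.replace('--', '-')
  let slug := repLoopA chars
  -- return slug.strip('-') or 'fault-case'
  let stripped := PySem.Chars.stripChars slug ['-']
  if stripped = [] then "fault-case" else String.ofList stripped

-- ===== PORT B =====
def fault_case_slug_py_alt (label : String) : String :=
  -- tokens = []; buf = []; for char in label.lower(): …
  let st := (PySem.Chars.lower label.toList).foldl
    (fun (st : List (List Char) × List Char) c =>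
      if PySem.Chars.isalnum c then (st.1, st.2 ++ [c])
      else if st.2 = [] then st else (st.1 ++ [st.2], []))
    ([], [])
  -- if buf: tokens.append(''.join(buf))
  let toks := if st.2 = [] then st.1 else st.1 ++ [st.2]
  -- return '-'.join(tokens) or 'fault-case'
  let out := PySem.Chars.join ['-'] toks
  if out = [] then "fault-case" else String.ofList out

-- ===== PRECONDITION & SPEC =====
def Spec_fault_case_slug_py (label : String) (out : String) : Prop := out = fault_case_slug_py_alt label
instance (label : String) (out : String) : Decidable (Spec_fault_case_slug_py label out) := by unfold Spec_fault_case_slug_py; infer_instance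

-- ===== CLAIM (what is proved, stated in full; the proofs are below) =====
def Claim_equal_fault_case_slug_py : Prop := ∀ (label : String), Dom_fault_case_slug_py label → Spec_fault_case_slug_py label (fault_case_slug_py label)

-- ===== LEMMAS AND PROOFS =====
def squeezeP : List Char → List Char
  | [] => []
  | [c] => [c]
  | c :: d :: t => if c = '-' ∧ d = '-' then squeezeP (d :: t) else c :: squeezeP (d :: t)

def squeezeR : List Char → List Char
  | [] => []
  | c :: t => if c = '-' then '-' :: squeezeR (t.dropWhile (· = '-')) else c :: squeezeR t
termination_by s => s.length
decreasing_by
  · exact Nat.lt_succ_of_le (List.length_dropWhile_le _ t)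
  · simp

theorem squeezeP_cons_dashRep (s : List Char) : ∀ (c : Char),
    squeezeP (c :: dashRep s) = squeezeP (c :: s) := by
  induction s using dashRep.induct with
  | case1 => intro c; rfl
  | case2 d => intro c; rfl
  | case3 a b t hab ih =>
    intro c
    obtain ⟨rfl, rfl⟩ := hab
    rw [show dashRep ('-' :: '-' :: t) = '-' :: dashRep t from by rw [dashRep.eq_def]; simp]
    by_cases hc : c = '-'
    · subst hc
      rw [show squeezeP ('-' :: '-' :: dashRep t) = squeezeP ('-' :: dashRep t) from by
        rw [squeezeP.eq_def]; simp]
      rw [ih '-']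
      rw [show squeezeP ('-' :: '-' :: '-' :: t) = squeezeP ('-' :: '-' :: t) from by
        rw [squeezeP.eq_def]; simp]
      rw [show squeezeP ('-' :: '-' :: t) = squeezeP ('-' :: t) from by
        rw [squeezeP.eq_def]; simp]
    · rw [show squeezeP (c :: '-' :: dashRep t) = c :: squeezeP ('-' :: dashRep t) from by
        rw [squeezeP.eq_def]; simp [hc]]
      rw [ih '-']
      rw [show squeezeP (c :: '-' :: '-' :: t) = c :: squeezeP ('-' :: '-' :: t) from by
        rw [squeezeP.eq_def]; simp [hc]]
      rw [show squeezeP ('-' :: '-' :: t) = squeezeP ('-' :: t) from by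
        rw [squeezeP.eq_def]; simp]
  | case4 a b t hab ih =>
    intro c
    rw [show dashRep (a :: b :: t) = a :: dashRep (b :: t) from by rw [dashRep.eq_def]; simp [hab]]
    by_cases hca : c = '-' ∧ a = '-'
    · obtain ⟨rfl, rfl⟩ := hca
      rw [show squeezeP ('-' :: '-' :: dashRep (b :: t)) = squeezeP ('-' :: dashRep (b :: t)) from by
        rw [squeezeP.eq_def]; simp]
      rw [ih '-']
      rw [show squeezeP ('-' :: '-' :: b :: t) = squeezeP ('-' :: b :: t) from by
        rw [squeezeP.eq_def]; simp]
    · rw [show squeezeP (c :: a :: dashRep (b :: t)) = c :: squeezeP (a :: dashRep (b :: t)) from by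
        rw [squeezeP.eq_def]; simp [hca]]
      rw [ih a]
      rw [show squeezeP (c :: a :: b :: t) = c :: squeezeP (a :: b :: t) from by
        rw [squeezeP.eq_def]; simp [hca]]

theorem squeezeP_dashRep (s : List Char) : squeezeP (dashRep s) = squeezeP s := by
  match s with
  | [] => rfl
  | [c] => rfl
  | a :: b :: t =>
    by_cases hab : a = '-' ∧ b = '-'
    · obtain ⟨rfl, rfl⟩ := hab
      rw [show dashRep ('-' :: '-' :: t) = '-' :: dashRep t from by rw [dashRep.eq_def]; simp]
      rw [squeezeP_cons_dashRep t '-']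
      rw [show squeezeP ('-' :: '-' :: t) = squeezeP ('-' :: t) from by rw [squeezeP.eq_def]; simp]
    · rw [show dashRep (a :: b :: t) = a :: dashRep (b :: t) from by rw [dashRep.eq_def]; simp [hab]]
      rw [squeezeP_cons_dashRep (b :: t) a]

theorem squeezeP_of_not_infix (s : List Char) (h : ¬ ['-', '-'] <:+: s) : squeezeP s = s := by
  fun_induction squeezeP with
  | case1 => rfl
  | case2 c => rfl
  | case3 a b t hab ih =>
    exfalso; obtain ⟨rfl, rfl⟩ := hab
    exact h ⟨[], t, rfl⟩
  | case4 a b t hab ih =>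
    rw [ih (fun hinf => h (List.infix_cons_iff.mpr (Or.inr hinf)))]

theorem squeezeR_nil : squeezeR [] = [] := by rw [squeezeR]

theorem squeezeR_cons (c : Char) (t : List Char) :
    squeezeR (c :: t) = if c = '-' then '-' :: squeezeR (t.dropWhile (· = '-')) else c :: squeezeR t := by
  rw [squeezeR]

theorem squeezeP_eq_squeezeR (s : List Char) : squeezeP s = squeezeR s := by
  fun_induction squeezeP with
  | case1 => rw [squeezeR_nil]
  | case2 c => rw [squeezeR_cons]; split <;> simp [squeezeR_nil] <;> simp_all
  | case3 a b t hab ih =>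
    obtain ⟨rfl, rfl⟩ := hab
    rw [ih, squeezeR_cons '-' ('-' :: t), if_pos rfl, squeezeR_cons '-' t, if_pos rfl]
    simp
  | case4 a b t hab ih =>
    by_cases ha : a = '-'
    · subst ha
      have hb : b ≠ '-' := fun hb => hab ⟨rfl, hb⟩
      rw [ih, squeezeR_cons '-' (b :: t), if_pos rfl]
      simp [hb]
    · rw [ih, squeezeR_cons a (b :: t), if_neg ha]

theorem repLoopA_eq_squeezeP (s : List Char) : repLoopA s = squeezeP s := by
  fun_induction repLoopA with
  | case1 s h ih =>
    rw [ih, replace_dash_eq, squeezeP_dashRep]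
  | case2 s h =>
    rw [squeezeP_of_not_infix s (fun hinf => h ((PySem.Chars.isIn_iff_infix _ _).mpr hinf))]

def markD (c : Char) : Char := if PySem.Chars.isalnum c then c else '-'

def pTokens : List Char → List (List Char)
  | [] => []
  | c :: t =>
    if PySem.Chars.isalnum c then
      (c :: t.takeWhile PySem.Chars.isalnum) :: pTokens (t.dropWhile PySem.Chars.isalnum)
    else pTokens t
termination_by s => s.length
decreasing_by
  · exact Nat.lt_succ_of_le (List.length_dropWhile_le _ t)
  · simp

def preD : List Char → List Char
  | [] => []
  | c :: _ => if PySem.Chars.isalnum c then [] else ['-']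

def sufD (cs : List Char) : List Char :=
  if pTokens cs = [] then []
  else match cs.getLast? with
    | some c => if PySem.Chars.isalnum c then [] else ['-']
    | none => []

theorem pTokens_nil : pTokens [] = [] := by rw [pTokens]

theorem pTokens_cons (c : Char) (t : List Char) :
    pTokens (c :: t) = if PySem.Chars.isalnum c then
      (c :: t.takeWhile PySem.Chars.isalnum) :: pTokens (t.dropWhile PySem.Chars.isalnum)
    else pTokens t := by
  rw [pTokens]

theorem pTokens_dropWhile (t : List Char) :
    pTokens (t.dropWhile (fun c => !PySem.Chars.isalnum c)) = pTokens t := by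
  induction t with
  | nil => rfl
  | cons c t ih =>
    by_cases hc : PySem.Chars.isalnum c
    · simp [hc]
    · simp only [List.dropWhile_cons, hc, Bool.not_false, if_pos]
      rw [ih, pTokens_cons, if_neg hc]

theorem pTokens_eq_nil_forall (t : List Char) (h : pTokens t = []) :
    ∀ x ∈ t, PySem.Chars.isalnum x = false := by
  induction t with
  | nil => simp
  | cons c t ih =>
    rw [pTokens_cons] at h
    by_cases hc : PySem.Chars.isalnum c
    · rw [if_pos hc] at h; simp at h
    · rw [if_neg hc] at h
      intro x hx
      rcases List.mem_cons.mp hx with rfl | hx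
      · simpa using hc
      · exact ih h x hx

theorem pTokens_wf (cs : List Char) :
    ∀ tok ∈ pTokens cs, tok ≠ [] ∧ ∀ ch ∈ tok, PySem.Chars.isalnum ch = true := by
  fun_induction pTokens with
  | case1 => simp
  | case2 c t hc ih =>
    intro tok htok
    rcases List.mem_cons.mp htok with rfl | htok
    · refine ⟨by simp, ?_⟩
      intro ch hch
      rcases List.mem_cons.mp hch with rfl | hch
      · exact hc
      · exact List.mem_takeWhile_imp hch
    · exact ih tok htok
  | case3 c t hc ih => exact ih

theorem dropWhile_dash_map_mark (t : List Char) :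
    (t.map markD).dropWhile (· = '-') = (t.dropWhile (fun c => !PySem.Chars.isalnum c)).map markD := by
  induction t with
  | nil => rfl
  | cons c t ih =>
    by_cases hc : PySem.Chars.isalnum c
    · have hcd : c ≠ '-' := by
        intro h; subst h; exact absurd hc (by decide)
      simp [markD, hc, hcd]
    · simp [markD, hc, ih]

theorem join_cons_char (c : Char) (x : List Char) (rest : List (List Char)) :
    PySem.Chars.join ['-'] ((c :: x) :: rest) = c :: PySem.Chars.join ['-'] (x :: rest) := by
  match rest with
  | [] => rw [PySem.Chars.join_singleton, PySem.Chars.join_singleton]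
  | q :: r => rw [PySem.Chars.join_cons_cons, PySem.Chars.join_cons_cons]; simp

theorem squeeze_mark_eq_aux (n : Nat) : ∀ (cs : List Char), cs.length ≤ n →
    squeezeR (cs.map markD) = preD cs ++ PySem.Chars.join ['-'] (pTokens cs) ++ sufD cs := by
  induction n with
  | zero =>
    intro cs h
    have : cs = [] := List.length_eq_zero_iff.mp (Nat.le_zero.mp h)
    subst this
    simp [squeezeR_nil, pTokens_nil, preD, sufD, PySem.Chars.join_nil]
  | succ n ih =>
    intro cs hlen
    match cs with
    | [] => simp [squeezeR_nil, pTokens_nil, preD, sufD, PySem.Chars.join_nil]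
    | c :: t =>
      by_cases hc : PySem.Chars.isalnum c
      · -- c alphanumeric
        have hcd : c ≠ '-' := fun h => by subst h; exact absurd hc (by decide)
        have hmc : markD c = c := if_pos hc
        rw [List.map_cons, hmc, squeezeR_cons, if_neg hcd]
        rw [show preD (c :: t) = [] from if_pos hc]
        match t with
        | [] =>
          rw [show pTokens [c] = [[c]] from by rw [pTokens_cons, if_pos hc]; simp [pTokens_nil]]
          rw [PySem.Chars.join_singleton]
          rw [show sufD [c] = [] from by
            rw [sufD, if_neg (by rw [pTokens_cons, if_pos hc]; simp [pTokens_nil])]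
            simp [hc]]
          simp [squeezeR_nil]
        | d :: t₂ =>
          have hlen' : (d :: t₂).length ≤ n := by simp at hlen ⊢; omega
          rw [ih _ hlen']
          by_cases hd : PySem.Chars.isalnum d
          · -- run continues
            have h1 : pTokens (c :: d :: t₂) =
                (c :: d :: t₂.takeWhile PySem.Chars.isalnum) ::
                  pTokens (t₂.dropWhile PySem.Chars.isalnum) := by
              rw [pTokens_cons, if_pos hc]; simp [hd]
            have h2 : pTokens (d :: t₂) =
                (d :: t₂.takeWhile PySem.Chars.isalnum) ::
                  pTokens (t₂.dropWhile PySem.Chars.isalnum) := by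
              rw [pTokens_cons, if_pos hd]
            have hsuf : sufD (c :: d :: t₂) = sufD (d :: t₂) := by
              rw [sufD, sufD, h1, h2, List.getLast?_cons_cons]; simp
            rw [h1, h2, hsuf, show preD (d :: t₂) = [] from if_pos hd,
              join_cons_char c (d :: t₂.takeWhile PySem.Chars.isalnum),
              join_cons_char d (t₂.takeWhile PySem.Chars.isalnum)]
            simp
          · -- run ends after c
            have h1 : pTokens (c :: d :: t₂) = [c] :: pTokens (d :: t₂) := by
              rw [pTokens_cons, if_pos hc]
              simp [hd]
            by_cases hE : pTokens (d :: t₂) = []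
            · have hx : ∃ x, (d :: t₂).getLast? = some x := by
                cases h : (d :: t₂).getLast? with
                | none => simp at h
                | some x => exact ⟨x, rfl⟩
              obtain ⟨x, hx⟩ := hx
              have hxt : PySem.Chars.isalnum x = false :=
                pTokens_eq_nil_forall _ hE x (List.mem_of_getLast? hx)
              rw [h1, hE, PySem.Chars.join_singleton, PySem.Chars.join_nil]
              rw [show sufD (d :: t₂) = [] from by rw [sufD, if_pos hE]]
              rw [show sufD (c :: d :: t₂) = ['-'] from by
                rw [sufD, if_neg (by rw [h1, hE]; simp), List.getLast?_cons_cons, hx]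
                simp [hxt]]
              rw [show preD (d :: t₂) = ['-'] from if_neg hd]
              simp
            · obtain ⟨a, rest, ha⟩ : ∃ a rest, pTokens (d :: t₂) = a :: rest := by
                cases h : pTokens (d :: t₂) with
                | nil => exact absurd h hE
                | cons a rest => exact ⟨a, rest, rfl⟩
              have hsuf : sufD (c :: d :: t₂) = sufD (d :: t₂) := by
                rw [sufD, sufD, h1, ha, List.getLast?_cons_cons]; simp
              rw [h1, ha, PySem.Chars.join_cons_cons, hsuf,
                show preD (d :: t₂) = ['-'] from if_neg hd, ← ha]
              simp
      · -- c not alphanumeric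
        have hmc : markD c = '-' := if_neg hc
        rw [List.map_cons, hmc, squeezeR_cons, if_pos rfl, dropWhile_dash_map_mark]
        set t' := t.dropWhile (fun c => !PySem.Chars.isalnum c) with ht'
        have hlen' : t'.length ≤ n := by
          have h2 := List.length_dropWhile_le (fun c => !PySem.Chars.isalnum c) t
          rw [← ht'] at h2
          simp at hlen; omega
        rw [ih t' hlen']
        have hpre' : preD t' = [] := by
          match h : t' with
          | [] => rfl
          | c' :: r =>
            have hdw : List.dropWhile (fun c => !PySem.Chars.isalnum c) t = c' :: r :=
              ht'.symm
            have hw : List.dropWhile (fun c => !PySem.Chars.isalnum c) t ≠ [] := by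
              rw [hdw]; simp
            have hhead := List.head_dropWhile_not (fun c => !PySem.Chars.isalnum c) hw
            simp [hdw] at hhead
            rw [preD, if_pos hhead]
        have hJ : pTokens t' = pTokens (c :: t) := by
          rw [ht', pTokens_dropWhile, pTokens_cons, if_neg hc]
        have hsuf : sufD t' = sufD (c :: t) := by
          by_cases hE : pTokens t' = []
          · rw [sufD, sufD, if_pos hE, if_pos (by rw [← hJ]; exact hE)]
          · have ht'ne : t' ≠ [] := fun h => hE (by rw [h, pTokens_nil])
            have hsf : t'.getLast? = (c :: t).getLast? := by
              obtain ⟨pre, hpre⟩ : ∃ pre, pre ++ t' = t := (List.dropWhile_suffix _)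
              rw [← hpre]
              rw [show c :: (pre ++ t') = (c :: pre) ++ t' from rfl]
              rw [List.getLast?_append_of_ne_nil _ ht'ne]
            rw [sufD, sufD, if_neg hE, if_neg (by rw [← hJ]; exact hE), hsf]
        rw [hpre', hJ, hsuf, show preD (c :: t) = ['-'] from if_neg hc]
        simp

theorem squeeze_mark_eq (cs : List Char) :
    squeezeR (cs.map markD) = preD cs ++ PySem.Chars.join ['-'] (pTokens cs) ++ sufD cs :=
  squeeze_mark_eq_aux cs.length cs le_rfl

theorem join_head (toks : List (List Char))
    (hne : toks ≠ []) (hwf : ∀ tok ∈ toks, tok ≠ [] ∧ ∀ ch ∈ tok, PySem.Chars.isalnum ch = true) :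
    ∃ c rest, PySem.Chars.join ['-'] toks = c :: rest ∧ PySem.Chars.isalnum c = true := by
  match toks with
  | [] => exact absurd rfl hne
  | tok :: rest =>
    obtain ⟨htne, hall⟩ := hwf tok (by simp)
    match tok, htne with
    | c :: x, _ =>
      exact ⟨c, PySem.Chars.join ['-'] (x :: rest), join_cons_char c x rest, hall c (by simp)⟩

theorem join_last (toks : List (List Char))
    (hne : toks ≠ []) (hwf : ∀ tok ∈ toks, tok ≠ [] ∧ ∀ ch ∈ tok, PySem.Chars.isalnum ch = true) :
    ∃ c rest, (PySem.Chars.join ['-'] toks).reverse = c :: rest ∧ PySem.Chars.isalnum c = true := by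
  induction toks with
  | nil => exact absurd rfl hne
  | cons tok rest ih =>
    match rest with
    | [] =>
      obtain ⟨htne, hall⟩ := hwf tok (by simp)
      rw [PySem.Chars.join_singleton]
      have hrne : tok.reverse ≠ [] := by simpa using htne
      match h : tok.reverse with
      | [] => exact absurd h hrne
      | c :: r =>
        refine ⟨c, r, rfl, hall c ?_⟩
        have : c ∈ tok.reverse := by rw [h]; simp
        simpa using this
    | q :: r =>
      obtain ⟨c, rr, hcr, hc⟩ := ih (by simp)
        (fun tk htk => hwf tk (List.mem_cons_of_mem _ htk))
      rw [PySem.Chars.join_cons_cons]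
      refine ⟨c, rr ++ ['-'] ++ tok.reverse, ?_, hc⟩
      simp [hcr]

theorem strip_all_dash (l : List Char) (h : ∀ x ∈ l, x = '-') :
    PySem.Chars.stripChars l ['-'] = [] := by
  rw [PySem.Chars.stripChars]
  have h1 : List.dropWhile (fun c => List.contains ['-'] c) l = [] :=
    List.dropWhile_eq_nil_iff.mpr (fun x hx => by simp [h x hx])
  rw [h1]
  simp

theorem strip_pre_suf (pre suf J : List Char)
    (hpre : ∀ x ∈ pre, x = '-') (hsuf : ∀ x ∈ suf, x = '-')
    (hh : ∃ c rest, J = c :: rest ∧ PySem.Chars.isalnum c = true)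
    (hl : ∃ c rest, J.reverse = c :: rest ∧ PySem.Chars.isalnum c = true) :
    PySem.Chars.stripChars (pre ++ J ++ suf) ['-'] = J := by
  obtain ⟨c, r, hJ, hc⟩ := hh
  obtain ⟨c', r', hJr, hc'⟩ := hl
  have hcd : c ≠ '-' := fun h => by subst h; exact absurd hc (by decide)
  have hcd' : c' ≠ '-' := fun h => by subst h; exact absurd hc' (by decide)
  rw [PySem.Chars.stripChars]
  have h1 : List.dropWhile (fun c => List.contains ['-'] c) pre = [] :=
    List.dropWhile_eq_nil_iff.mpr (fun x hx => by simp [hpre x hx])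
  have h2 : List.dropWhile (fun c => List.contains ['-'] c) (pre ++ (J ++ suf)) = J ++ suf := by
    rw [List.dropWhile_append, h1]
    simp only [List.isEmpty_nil, if_pos]
    rw [hJ, List.cons_append, List.dropWhile_cons]
    simp [hcd]
  rw [List.append_assoc, h2]
  have h3 : (J ++ suf).reverse = suf.reverse ++ J.reverse := by simp
  rw [h3]
  have h4 : List.dropWhile (fun c => List.contains ['-'] c) suf.reverse = [] :=
    List.dropWhile_eq_nil_iff.mpr (fun x hx => by simp [hsuf x (by simpa using hx)])
  rw [List.dropWhile_append, h4]
  simp only [List.isEmpty_nil, if_pos]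
  rw [hJr, List.dropWhile_cons]
  simp [hcd']
  rw [show J = r'.reverse ++ [c'] from by rw [← List.reverse_reverse J, hJr]; simp]

def finalizeB (st : List (List Char) × List Char) : List (List Char) :=
  if st.2 = [] then st.1 else st.1 ++ [st.2]

def carryB (buf cs : List Char) : List (List Char) :=
  if buf = [] then pTokens cs
  else (buf ++ cs.takeWhile PySem.Chars.isalnum) :: pTokens (cs.dropWhile PySem.Chars.isalnum)

theorem foldB_eq (cs : List Char) : ∀ (toks : List (List Char)) (buf : List Char),
    finalizeB (cs.foldl
      (fun (st : List (List Char) × List Char) c =>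
        if PySem.Chars.isalnum c then (st.1, st.2 ++ [c])
        else if st.2 = [] then st else (st.1 ++ [st.2], []))
      (toks, buf)) = toks ++ carryB buf cs := by
  induction cs with
  | nil =>
    intro toks buf
    rw [List.foldl_nil, carryB, finalizeB]
    by_cases hb : buf = []
    · simp [hb, pTokens_nil]
    · simp [hb, pTokens_nil]
  | cons c t ih =>
    intro toks buf
    rw [List.foldl_cons]
    by_cases hc : PySem.Chars.isalnum c
    · rw [if_pos hc]
      rw [ih toks (buf ++ [c])]
      congr 1
      rw [carryB, carryB]
      by_cases hb : buf = []
      · subst hb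
        simp only [List.nil_append, reduceIte]
        rw [if_neg (by simp), pTokens_cons, if_pos hc]
        simp
      · rw [if_neg hb, if_neg (by simp [hb])]
        simp [hc]
    · rw [if_neg hc]
      by_cases hb : buf = []
      · subst hb
        simp only [reduceIte]
        rw [ih toks []]
        congr 1
        rw [carryB, carryB]
        simp only [reduceIte]
        rw [pTokens_cons, if_neg hc]
      · rw [if_neg hb]
        rw [ih (toks ++ [buf]) []]
        rw [carryB, carryB, if_neg hb]
        simp only [reduceIte]
        rw [List.takeWhile_cons, List.dropWhile_cons]
        simp only [hc]
        simp only [Bool.false_eq_true, if_false]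
        rw [pTokens_cons, if_neg hc]
        simp

theorem preD_dash (cs : List Char) : ∀ x ∈ preD cs, x = '-' := by
  match cs with
  | [] => simp [preD]
  | c :: t => rw [preD]; split <;> simp

theorem sufD_dash (cs : List Char) : ∀ x ∈ sufD cs, x = '-' := by
  rw [sufD]
  split
  · simp
  · split
    · split <;> simp
    · simp


theorem ports_agree (label : String) : fault_case_slug_py label = fault_case_slug_py_alt label := by
  simp only [fault_case_slug_py, fault_case_slug_py_alt]
  set cs := PySem.Chars.lower label.toList with hcs
  have hfold : cs.foldl (fun acc c => if PySem.Chars.isalnum c then acc ++ [c] else acc ++ ['-']) []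
      = cs.map markD := by
    have hfun : (fun (acc : List Char) c => if PySem.Chars.isalnum c then acc ++ [c] else acc ++ ['-'])
        = (fun acc c => acc ++ [markD c]) := by
      funext acc c; rw [markD]; split <;> rfl
    rw [hfun, PySem.List.foldl_append_singleton_eq_map markD cs []]
    simp
  have hA : repLoopA (cs.foldl (fun acc c => if PySem.Chars.isalnum c then acc ++ [c] else acc ++ ['-']) [])
      = preD cs ++ PySem.Chars.join ['-'] (pTokens cs) ++ sufD cs := by
    rw [hfold, repLoopA_eq_squeezeP, squeezeP_eq_squeezeR, squeeze_mark_eq]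
  have hB := foldB_eq cs [] []
  rw [finalizeB] at hB
  rw [carryB, if_pos rfl, List.nil_append] at hB
  rw [hA, hB]
  by_cases hE : pTokens cs = []
  · rw [hE, PySem.Chars.join_nil]
    rw [if_pos rfl]
    rw [if_pos (by
      apply strip_all_dash
      intro x hx
      rcases List.mem_append.mp hx with hx | hx
      · rcases List.mem_append.mp hx with hx | hx
        · exact preD_dash cs x hx
        · simp at hx
      · exact sufD_dash cs x hx)]
  · have hwf := pTokens_wf cs
    have hh := join_head (pTokens cs) hE hwf
    have hl := join_last (pTokens cs) hE hwf
    rw [strip_pre_suf (preD cs) (sufD cs) _ (preD_dash cs) (sufD_dash cs) hh hl]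

-- ===== VERDICT (by name: the statement is the Claim_ definition above) =====
theorem fault_case_slug_py_spec : Claim_equal_fault_case_slug_py := by
  intro label _
  unfold Spec_fault_case_slug_py
  exact ports_agree label
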